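-- pv_equiv track=rewrite | github.com/agnul/AdventOfCode | 2023/python/day_13.py | part_1
-- ===== SOURCE A (Python) =====
-- def is_reflection(grid, row):
--     size = min(row, len(grid) - row)
--     return all(grid[row-i-1] == grid[row+i] for i in range(0, size))
--
-- def part_1(data):
--     total = 0
--     for grid in data:
--         rows = grid.splitlines()
--         for r in range(1, len(rows)):
--             total += 100 * r if is_reflection(rows, r) else 0
--
--         cols = [''.join(c) for c in zip(*rows)]
--         for c in range(1, len(cols)):
--             total += c if is_reflection(cols, c) else 0
--     return total
-- ===== SOURCE B (Python) =====
-- def _axes_sum(lines):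
--     # sieve: axis r (1<=r<n) is valid iff no pair i<j with i+j == 2r-1 mismatches
--     n = len(lines)
--     dead = [False] * (2 * n)
--     for i in range(n):
--         for j in range(i + 1, n):
--             if lines[i] != lines[j]:
--                 dead[i + j] = True
--     return sum(r for r in range(1, n) if not dead[2 * r - 1])
--
-- def part_1(data):
--     total = 0
--     for grid in data:
--         rows = grid.splitlines()
--         cols = [''.join(c) for c in zip(*rows)]
--         total += 100 * _axes_sum(rows) + _axes_sum(cols)
--     return total
-- ===== Notes on version B (the rewrite author's own statement) =====
-- stated objective: alternative
-- what changed: B never verifies any mirror axis: a single pass over the unordered index pairs i<j marks the anti-diagonal sum i+j of every mismatching pair of lines in a sieve array, and the answer is the sum of the axes r whose sum 2r-1 was never marked (axis r reflects exactly the pairs with i+j=2r-1), replacing A's per-axis expand-and-compare check.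
import Mathlib
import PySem

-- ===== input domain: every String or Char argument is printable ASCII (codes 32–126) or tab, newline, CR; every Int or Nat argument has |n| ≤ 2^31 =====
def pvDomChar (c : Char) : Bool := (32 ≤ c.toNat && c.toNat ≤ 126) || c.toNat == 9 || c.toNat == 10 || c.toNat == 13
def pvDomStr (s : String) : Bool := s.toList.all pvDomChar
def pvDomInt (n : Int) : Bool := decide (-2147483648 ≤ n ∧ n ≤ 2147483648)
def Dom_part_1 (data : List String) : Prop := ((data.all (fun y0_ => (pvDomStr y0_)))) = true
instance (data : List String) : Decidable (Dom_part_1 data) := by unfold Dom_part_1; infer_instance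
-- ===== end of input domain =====

-- B replaces A's per-axis mirror verification by a sieve: one pass over the index
-- pairs i < j marks the anti-diagonal sum i+j of every mismatching pair as a dead
-- axis, and then sums the axes r whose sum 2r-1 was never marked; objective: alternative.

-- ===== PORT A =====

-- [''.join(c) for c in zip(*rows)] — this line is verbatim in both Pythons, ported once.
-- zip(*rows) stops at the shortest row, so j < pvMinLen rows ≤ every row length
-- and the ' ' default of getD is never used: exact.
def pvMinLen : List String → Nat
  | [] => 0
  | [s] => s.toList.length
  | s :: rest => min s.toList.length (pvMinLen rest)

def pvZipCols (rows : List String) : List String :=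
  (List.range (pvMinLen rows)).map (fun j => String.ofList (rows.map (fun s => s.toList.getD j ' ')))

-- is_reflection(grid, row); part_1 only calls it with 1 ≤ row < len(grid), so the
-- indices row-i-1 and row+i (0 ≤ i < size) are always in range and pyGetD is exact.
def is_reflection (grid : List String) (row : Int) : Bool :=
  let size := min row ((grid.length : Int) - row)
  (PySem.List.pyRange 0 size 1).all (fun i =>
    PySem.List.pyGetD grid (row - i - 1) "" == PySem.List.pyGetD grid (row + i) "")

def part_1 (data : List String) : Int :=
  data.foldl (fun total grid =>
    let rows := PySem.Str.splitlines grid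
    let total := (PySem.List.pyRange 1 (rows.length : Int) 1).foldl
      (fun t r => t + (if is_reflection rows r then 100 * r else 0)) total
    let cols := pvZipCols rows
    (PySem.List.pyRange 1 (cols.length : Int) 1).foldl
      (fun t c => t + (if is_reflection cols c then c else 0)) total) 0

-- ===== PORT B =====

-- the double loop of _axes_sum: dead[i+j] = True for every mismatching pair i < j.
-- range(i+1, n) is List.range' (i+1) (n-(i+1)); dead[k] = True is List.set (in range
-- whenever the loop reaches it, since i + j ≤ 2n-3 < 2n).
def pvDead (lines : List String) : List Bool :=
  let n := lines.length
  (List.range n).foldl (fun dead i =>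
    (List.range' (i + 1) (n - (i + 1))).foldl (fun d j =>
      if lines.getD i "" ≠ lines.getD j "" then d.set (i + j) true else d) dead)
    (List.replicate (2 * n) false)

-- sum(r for r in range(1, n) if not dead[2*r-1])
def pvAxesSum (lines : List String) : Int :=
  let n := lines.length
  let dead := pvDead lines
  (((List.range' 1 (n - 1)).filter (fun r => !(dead.getD (2 * r - 1) false))).map
    (fun r => Int.ofNat r)).sum

def part_1_alt (data : List String) : Int :=
  data.foldl (fun total grid =>
    let rows := PySem.Str.splitlines grid
    let cols := pvZipCols rows
    total + (100 * pvAxesSum rows + pvAxesSum cols)) 0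

-- ===== PRECONDITION & SPEC =====
def Spec_part_1 (data : List String) (out : Int) : Prop := out = part_1_alt data
instance (data : List String) (out : Int) : Decidable (Spec_part_1 data out) := by unfold Spec_part_1; infer_instance

-- ===== CLAIM (what is proved, stated in full; the proofs are below) =====
def Claim_equal_part_1 : Prop := ∀ (data : List String), Dom_part_1 data → Spec_part_1 data (part_1 data)

-- ===== LEMMAS AND PROOFS =====

-- getD after a single in-range set
lemma pv_getD_set (d : List Bool) (k s : Nat) (hk : k < d.length) :
    (d.set k true).getD s false = (d.getD s false || (k == s)) := by
  by_cases h : k = s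
  · subst h
    rw [List.getD_eq_getElem _ _ (by simpa using hk)]
    simp [List.getElem_set_self]
  · simp [List.getD, List.getElem?_set_ne h, h]

-- a fold of "maybe set one bit" steps, read back at one position
lemma pv_foldl_or {α : Type} (g : α → List Bool → List Bool) (h : α → Bool) (s L : Nat) :
    ∀ (l : List α) (d : List Bool), d.length = L →
    (∀ a ∈ l, ∀ d' : List Bool, d'.length = L →
      (g a d').length = L ∧ (g a d').getD s false = (d'.getD s false || h a)) →
    (l.foldl (fun d a => g a d) d).length = L ∧
    (l.foldl (fun d a => g a d) d).getD s false = (d.getD s false || l.any h) := by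
  intro l
  induction l with
  | nil => intro d hd _; simpa using hd
  | cons a l ih =>
      intro d hd H
      have h1 := H a (by simp) d hd
      have h2 := ih (g a d) h1.1 (fun b hb => H b (by simp [hb]))
      refine ⟨h2.1, ?_⟩
      simp only [List.foldl_cons] at *
      rw [h2.2, h1.2, List.any_cons, Bool.or_assoc]

-- what pvDead records at position s
lemma pvDead_spec (lines : List String) (s : Nat) :
    ((pvDead lines).getD s false = true) ↔
    ∃ i j, i < lines.length ∧ j < lines.length ∧ i < j ∧ i + j = s ∧
      lines.getD i "" ≠ lines.getD j "" := by
  unfold pvDead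
  have Hin : ∀ i, i ∈ List.range lines.length → ∀ d' : List Bool, d'.length = 2 * lines.length →
      ((List.range' (i + 1) (lines.length - (i + 1))).foldl (fun d j =>
        if lines.getD i "" ≠ lines.getD j "" then d.set (i + j) true else d) d').length = 2 * lines.length ∧
      ((List.range' (i + 1) (lines.length - (i + 1))).foldl (fun d j =>
        if lines.getD i "" ≠ lines.getD j "" then d.set (i + j) true else d) d').getD s false
        = (d'.getD s false ||
          (List.range' (i + 1) (lines.length - (i + 1))).any
            (fun j => decide (lines.getD i "" ≠ lines.getD j "") && (i + j == s))) := by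
    intro i hi d' hd'
    rw [List.mem_range] at hi
    exact pv_foldl_or
      (g := fun j d => if lines.getD i "" ≠ lines.getD j "" then d.set (i + j) true else d)
      (h := fun j => decide (lines.getD i "" ≠ lines.getD j "") && (i + j == s))
      s (2 * lines.length) _ d' hd'
      (by
        intro j hj d'' hd''
        rw [List.mem_range'_1] at hj
        have hij : i + j < 2 * lines.length := by omega
        dsimp only
        by_cases hc : lines.getD i "" ≠ lines.getD j ""
        · rw [if_pos hc]
          refine ⟨by simpa using hd'', ?_⟩
          rw [pv_getD_set _ _ _ (by omega), decide_eq_true hc, Bool.true_and]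
        · rw [if_neg hc, decide_eq_false hc, Bool.false_and, Bool.or_false]
          exact ⟨hd'', rfl⟩)
  have H := pv_foldl_or
    (g := fun i dead => (List.range' (i + 1) (lines.length - (i + 1))).foldl (fun d j =>
      if lines.getD i "" ≠ lines.getD j "" then d.set (i + j) true else d) dead)
    (h := fun i => (List.range' (i + 1) (lines.length - (i + 1))).any
      (fun j => decide (lines.getD i "" ≠ lines.getD j "") && (i + j == s)))
    s (2 * lines.length) (List.range lines.length) (List.replicate (2 * lines.length) false)
    (by rw [List.length_replicate]) Hin
  rw [H.2]
  have hrep : (List.replicate (2 * lines.length) false).getD s false = false := by simp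
  rw [hrep, Bool.false_or]
  simp only [List.any_eq_true, List.mem_range, List.mem_range'_1, Bool.and_eq_true,
    decide_eq_true_eq, beq_iff_eq]
  constructor
  · rintro ⟨i, hi, j, ⟨hj1, hj2⟩, hne, hsum⟩
    exact ⟨i, j, hi, by omega, by omega, hsum, hne⟩
  · rintro ⟨i, j, hi, hj, hij, hsum, hne⟩
    exact ⟨i, hi, j, ⟨by omega, by omega⟩, hne, hsum⟩

-- the crux: A's axis test equals "2r-1 not sieved out"
lemma pv_axis (lines : List String) (r : Nat) (h1 : 1 ≤ r) (h2 : r < lines.length) :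
    (is_reflection lines (r : Int) = true) ↔
    ((pvDead lines).getD (2 * r - 1) false = false) := by
  rw [Bool.eq_false_iff, Ne, pvDead_spec]
  set n := lines.length with hn
  set k := min r (n - r) with hk
  have hmin : min (r : Int) ((n : Int) - r) = (k : Int) := by omega
  unfold is_reflection
  simp only [← hn, hmin]
  rw [PySem.List.pyRange_one]
  simp only [sub_zero, Int.toNat_natCast, List.all_map, List.all_eq_true, List.mem_range,
    Function.comp, zero_add]
  constructor
  · -- all mirrored pairs equal → no bad pair with sum 2r-1
    intro h
    rintro ⟨i, j, hi, hj, hij, hsum, hne⟩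
    have hjr : r ≤ j := by omega
    have ht : j - r < k := by omega
    have := h (j - r) ht
    rw [show ((r : Int) - ((j - r : Nat) : Int) - 1) = ((i : Nat) : Int) by omega,
        show ((r : Int) + ((j - r : Nat) : Int)) = ((j : Nat) : Int) by omega,
        PySem.List.pyGetD_natCast, PySem.List.pyGetD_natCast, beq_iff_eq] at this
    exact hne this
  · intro h t ht
    rw [show ((r : Int) - ((t : Nat) : Int) - 1) = ((r - 1 - t : Nat) : Int) by omega,
        show ((r : Int) + ((t : Nat) : Int)) = ((r + t : Nat) : Int) by omega,
        PySem.List.pyGetD_natCast, PySem.List.pyGetD_natCast, beq_iff_eq]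
    by_contra hne
    exact h ⟨r - 1 - t, r + t, by omega, by omega, by omega, by omega, hne⟩

lemma pv_foldl_add_eq (L : List Int) (f : Int → Int) (t : Int) :
    L.foldl (fun s r => s + f r) t = t + (L.map f).sum := by
  induction L generalizing t with
  | nil => simp
  | cons a L ih => simp [ih]; ring

lemma pv_sum_filter_ite (l : List Nat) (p : Nat → Bool) :
    ((l.filter p).map (fun r => Int.ofNat r)).sum
      = (l.map (fun r => if p r then Int.ofNat r else 0)).sum := by
  induction l with
  | nil => rfl
  | cons a l ih =>
      by_cases h : p a
      · rw [List.filter_cons_of_pos h, List.map_cons, List.sum_cons, ih,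
            List.map_cons, List.sum_cons, if_pos h]
      · rw [List.filter_cons_of_neg (by simp [h]), ih, List.map_cons, List.sum_cons,
            if_neg h, zero_add]

-- one dimension: A's axis loop equals w * (B's sieve sum)
lemma pv_key (lines : List String) (w t : Int) :
    (PySem.List.pyRange 1 (lines.length : Int) 1).foldl
      (fun tt r => tt + (if is_reflection lines r then w * r else 0)) t
    = t + w * pvAxesSum lines := by
  rw [pv_foldl_add_eq]
  congr 1
  unfold pvAxesSum
  rw [pv_sum_filter_ite, PySem.List.pyRange_one, List.range'_eq_map_range]
  simp only [List.map_map]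
  rw [show ((lines.length : Int) - 1).toNat = lines.length - 1 by omega, ← List.sum_map_mul_left]
  apply congrArg
  apply List.map_congr_left
  intro m hm
  rw [List.mem_range] at hm
  simp only [Function.comp]
  have hcast : (1 : Int) + (m : Int) = ((1 + m : Nat) : Int) := by omega
  rw [hcast]
  by_cases hd : (pvDead lines).getD (2 * (1 + m) - 1) false = false
  · have hb : (!(pvDead lines).getD (2 * (1 + m) - 1) false) = true := by rw [hd]; rfl
    rw [if_pos ((pv_axis lines (1 + m) (by omega) (by omega)).mpr hd), if_pos hb,
        Int.ofNat_eq_natCast]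
  · have hd' : (pvDead lines).getD (2 * (1 + m) - 1) false = true := by
      rcases Bool.eq_false_or_eq_true ((pvDead lines).getD (2 * (1 + m) - 1) false) with h | h
      · exact h
      · exact absurd h hd
    have hb : (!(pvDead lines).getD (2 * (1 + m) - 1) false) = false := by rw [hd']; rfl
    rw [if_neg (fun hA => hd ((pv_axis lines (1 + m) (by omega) (by omega)).mp hA)),
        if_neg (by rw [hb]; exact Bool.false_ne_true), mul_zero]

-- ===== VERDICT (by name: the statement is the Claim_ definition above) =====
theorem part_1_spec : Claim_equal_part_1 := by
  intro data _
  unfold Spec_part_1 part_1 part_1_alt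
  congr 1
  funext total grid
  dsimp only
  rw [pv_key (PySem.Str.splitlines grid) 100 total]
  have hcols : (fun (t c : Int) => t + (if is_reflection (pvZipCols (PySem.Str.splitlines grid)) c then c else 0))
      = (fun (t c : Int) => t + (if is_reflection (pvZipCols (PySem.Str.splitlines grid)) c then 1 * c else 0)) := by
    funext t c
    split <;> simp
  rw [hcols, pv_key (pvZipCols (PySem.Str.splitlines grid)) 1]
  ring
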